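-- pv_equiv track=rewrite | github.com/speedpiyawatt/modelexp | tools/weather/run_server_dual_backtest.py | extract_result
-- ===== SOURCE A (Python) =====
-- from typing import Any
--
-- def extract_result(stdout: str) -> dict[str, Any] | None:
--     marker = "remote_run_root:"
--     date_marker = "date:"
--     remote_run_root: str | None = None
--     target_date: str | None = None
--     for line in stdout.splitlines():
--         if line.startswith(date_marker):
--             target_date = line.split(":", 1)[1].strip()
--         if line.startswith(marker):
--             remote_run_root = line.split(":", 1)[1].strip()
--     if target_date is None or remote_run_root is None:
--         return None
--     return {"target_date_local": target_date, "remote_run_root": remote_run_root}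
-- ===== SOURCE B (Python) =====
-- def extract_result(stdout):
--     table = {}
--     for line in stdout.splitlines():
--         i = line.find(":")
--         if i >= 0:
--             table[line[:i]] = line[i + 1:].strip()
--     date = table.get("date")
--     root = table.get("remote_run_root")
--     if date is None or root is None:
--         return None
--     return {"target_date_local": date, "remote_run_root": root}
-- ===== Notes on version B (the rewrite author's own statement) =====
-- stated objective: alternative
-- what changed: Replaces the two inline scalar accumulators and startswith/split tests with a single indexing pass that builds a prefix-before-first-colon -> stripped-value table (find + slicing, last occurrence wins) followed by two dictionary lookups.
import Mathlib
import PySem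

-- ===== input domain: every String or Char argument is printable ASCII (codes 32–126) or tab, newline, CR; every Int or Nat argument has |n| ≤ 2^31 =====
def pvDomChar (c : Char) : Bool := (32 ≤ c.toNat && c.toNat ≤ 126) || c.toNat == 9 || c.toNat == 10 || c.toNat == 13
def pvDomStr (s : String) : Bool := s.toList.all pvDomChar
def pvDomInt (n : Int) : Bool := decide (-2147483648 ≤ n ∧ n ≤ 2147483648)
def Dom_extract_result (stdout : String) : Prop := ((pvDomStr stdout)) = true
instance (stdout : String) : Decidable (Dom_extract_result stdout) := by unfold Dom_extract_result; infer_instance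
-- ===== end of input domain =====

-- B replaces A's two inline scalar accumulators with a prefix→value table built in one pass
-- plus two final lookups (alternative decomposition, same cost).

-- ===== PORT A =====
-- line.split(":", 1)[1]: on every line where A evaluates this, the line starts with "date:" or
-- "remote_run_root:", so the split always has a second piece; the getD defaults are unreachable.
def pvSplitSecond (line : String) : String :=
  (((PySem.Str.splitMax? line ":" 1).getD []).getD 1 "")

def pvStepA (st : Option String × Option String) (line : String) :
    Option String × Option String :=
  let st1 := if PySem.Str.startswith line "date:" then
    (some (PySem.Str.strip (pvSplitSecond line)), st.2) else st
  if PySem.Str.startswith line "remote_run_root:" then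
    (st1.1, some (PySem.Str.strip (pvSplitSecond line))) else st1

def extract_result (stdout : String) : Option (List (String × String)) :=
  match (PySem.Str.splitlines stdout).foldl pvStepA (none, none) with
  | (some td, some rr) => some [("target_date_local", td), ("remote_run_root", rr)]
  | _ => none

-- ===== PORT B =====
def pvStepB (t : PySem.Dict String String) (line : String) : PySem.Dict String String :=
  let i := PySem.Str.find line ":"
  if 0 ≤ i then
    t.insert (PySem.Str.slice line none (some i))
      (PySem.Str.strip (PySem.Str.slice line (some (i + 1)) none))
  else t

-- final lookup phase of B: date = table.get("date"); root = table.get("remote_run_root"); …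
def pvLookup (t : PySem.Dict String String) : Option (List (String × String)) :=
  match t.get? "date" with
  | none => none
  | some d =>
    match t.get? "remote_run_root" with
    | none => none
    | some r => some [("target_date_local", d), ("remote_run_root", r)]

def extract_result_alt (stdout : String) : Option (List (String × String)) :=
  pvLookup ((PySem.Str.splitlines stdout).foldl pvStepB (PySem.Dict.mk []))

-- ===== PRECONDITION & SPEC =====
-- A returns normally on every string, so Pre_ admits every input and excludes nothing; it is
-- stated (instead of omitted) only to document the productive shape of an input.
def Pre_extract_result (stdout : String) : Prop := True
/- a productive input carries both marker lines, e.g.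
"date: 2025-06
remote_run_root: /r"
on strings without both markers each program returns none. -/
instance (stdout : String) : Decidable (Pre_extract_result stdout) := by unfold Pre_extract_result; infer_instance

def pvWitness_extract_result : String := "date: 2025-06\nremote_run_root: /r"

def Spec_extract_result (stdout : String) (out : Option (List (String × String))) : Prop := out = extract_result_alt stdout
instance (stdout : String) (out : Option (List (String × String))) : Decidable (Spec_extract_result stdout out) := by unfold Spec_extract_result; infer_instance

-- ===== CLAIM (what is proved, stated in full; the proofs are below) =====
def Claim_equal_extract_result : Prop := ∀ (stdout : String), Dom_extract_result stdout → Pre_extract_result stdout → Spec_extract_result stdout (extract_result stdout)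

-- ===== LEMMAS AND PROOFS =====

-- splitOnMax.go with 0 splits left returns the remainder as one piece
lemma go_zero (fuel : Nat) (l cur : List Char) (acc : List (List Char)) :
    PySem.Chars.splitOnMax.go [':'] fuel 0 l cur acc = ((cur.reverse ++ l) :: acc).reverse := by
  cases fuel with
  | zero => rfl
  | succ n => cases l with
    | nil => simp [PySem.Chars.splitOnMax.go]
    | cons c t => simp [PySem.Chars.splitOnMax.go]

-- characterisation of one-split go: first piece is everything before the first ':'
lemma go_one (fuel : Nat) (l cur : List Char) (acc : List (List Char)) (h : l.length ≤ fuel) :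
    PySem.Chars.splitOnMax.go [':'] fuel 1 l cur acc =
      if ':' ∈ l then
        acc.reverse ++ [cur.reverse ++ l.takeWhile (· ≠ ':'),
          l.drop ((l.takeWhile (· ≠ ':')).length + 1)]
      else acc.reverse ++ [cur.reverse ++ l] := by
  induction fuel generalizing l cur acc with
  | zero =>
    have : l = [] := List.length_eq_zero_iff.mp (Nat.le_zero.mp h)
    subst this; simp [PySem.Chars.splitOnMax.go]
  | succ n ih =>
    cases l with
    | nil => simp [PySem.Chars.splitOnMax.go]
    | cons c t =>
      by_cases hc : c = ':'
      · subst hc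
        simp [PySem.Chars.splitOnMax.go, List.isPrefixOf, go_zero]
      · have hp : [':'].isPrefixOf (c :: t) = false := by
          simp [List.isPrefixOf]
          exact Ne.symm hc
        conv_lhs => rw [PySem.Chars.splitOnMax.go]
        simp only [hp, Bool.false_eq_true, if_false, Nat.add_one_ne_zero]
        rw [ih t (c :: cur) acc (by simpa using Nat.succ_le_succ_iff.mp h)]
        have hm : (':' ∈ c :: t) = (':' ∈ t) := by
          simp [List.mem_cons, Ne.symm hc]
        by_cases hmem : ':' ∈ t
        · simp [hm, hmem, hc, List.drop_succ_cons]
        · simp [hm, hmem]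

-- key before / rest after the first ':' of a line (proof-only helpers)
def keyOf (l : List Char) : List Char := l.takeWhile (· ≠ ':')
def restOf (l : List Char) : List Char := l.drop ((keyOf l).length + 1)

-- one-split specification: line.split(":", 1)
lemma split_spec (l : List Char) :
    PySem.Chars.splitOnMax l [':'] 1 =
      if ':' ∈ l then [keyOf l, restOf l] else [l] := by
  unfold PySem.Chars.splitOnMax
  rw [if_neg (by omega), show (1 : Int).toNat = 1 from rfl]
  rw [go_one (l.length + 1) l [] [] (by omega)]
  simp [keyOf, restOf]

-- find specification for a single-character needle
lemma find_go_spec (l : List Char) (k : Nat) :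
    PySem.Chars.find.go [':'] l k =
      if ':' ∈ l then ((k : Int) + (keyOf l).length) else -1 := by
  induction l generalizing k with
  | nil => simp [PySem.Chars.find.go]
  | cons c t ih =>
    by_cases hc : c = ':'
    · subst hc
      rw [PySem.Chars.find.go]
      simp [List.isPrefixOf, keyOf]
    · rw [PySem.Chars.find.go]
      have hp : [':'].isPrefixOf (c :: t) = false := by
        simp [List.isPrefixOf]
        exact Ne.symm hc
      rw [hp]
      simp only [Bool.false_eq_true, if_false, ih]
      by_cases hm : ':' ∈ t
      · have : (':' ∈ c :: t) = True := by simp [List.mem_cons, hm]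
        simp [this, hm, keyOf, hc]
        ring
      · have : (':' ∈ c :: t) = False := by simp [List.mem_cons, hm, Ne.symm hc]
        simp [this, hm]

lemma find_spec (l : List Char) :
    PySem.Chars.find l [':'] = if ':' ∈ l then ((keyOf l).length : Int) else -1 := by
  unfold PySem.Chars.find
  rw [find_go_spec]
  simp

-- decomposition of a line at its first ':'
lemma colon_decomp (l : List Char) (h : ':' ∈ l) :
    l = l.takeWhile (· ≠ ':') ++ ':' :: (l.dropWhile (· ≠ ':')).tail := by
  have h2 := List.takeWhile_append_dropWhile (p := (· ≠ ':')) (l := l)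
  have hnil : l.dropWhile (· ≠ ':') ≠ [] := by
    intro hnil
    rw [hnil, List.append_nil] at h2
    rw [← h2] at h
    have := List.mem_takeWhile_imp h
    simp at this
  have hhead : (l.dropWhile (· ≠ ':')).head hnil = ':' := by
    have := List.head_dropWhile_not (p := (· ≠ ':')) (l := l) hnil
    simpa using this
  have h3 := List.cons_head_tail hnil
  rw [hhead] at h3
  have h4 := congrArg (fun xs => List.takeWhile (fun x => decide (x ≠ ':')) l ++ xs) h3
  simp only [] at h4
  rw [h2] at h4
  exact h4.symm

lemma takeWhile_append_of_no_colon (p l : List Char) (h : ':' ∉ p) :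
    (p ++ l).takeWhile (· ≠ ':') = p ++ l.takeWhile (· ≠ ':') := by
  have hp : p.takeWhile (· ≠ ':') = p := List.takeWhile_eq_self_iff.mpr (by
    intro c hc
    simp only [ne_eq, decide_eq_true_eq]
    exact fun e => h (e ▸ hc))
  rw [List.takeWhile_append, hp]
  simp

-- a marker prefix "p:" is present iff the key before the first ':' is exactly p
lemma prefix_iff (p l : List Char) (hp : ':' ∉ p) :
    (p ++ [':']) <+: l ↔ (':' ∈ l ∧ keyOf l = p) := by
  constructor
  · rintro ⟨r, hr⟩
    rw [List.append_assoc] at hr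
    subst hr
    refine ⟨by simp, ?_⟩
    unfold keyOf
    rw [takeWhile_append_of_no_colon p _ hp]
    simp
  · rintro ⟨hm, hk⟩
    have := colon_decomp l hm
    rw [show l.takeWhile (· ≠ ':') = p from hk] at this
    exact ⟨(l.dropWhile (· ≠ ':')).tail, by simpa [List.append_assoc] using this.symm⟩

lemma keyOf_prefix_take (l : List Char) : l.take (keyOf l).length = keyOf l :=
  (List.prefix_iff_eq_take.mp (List.takeWhile_prefix _)).symm

-- the per-line step: A's accumulator pair tracks B's table at the two keys
lemma step_eq (line : String) (td rr : Option String) (t : PySem.Dict String String)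
    (h1 : td = t.get? "date") (h2 : rr = t.get? "remote_run_root") :
    pvStepA (td, rr) line =
      ((pvStepB t line).get? "date", (pvStepB t line).get? "remote_run_root") := by
  have hdateL : ("date:".toList : List Char) = "date".toList ++ [':'] := by decide
  have hrootL : ("remote_run_root:".toList : List Char) = "remote_run_root".toList ++ [':'] := by decide
  have hnd : ':' ∉ "date".toList := by decide
  have hnr : ':' ∉ "remote_run_root".toList := by decide
  have hsw_d : PySem.Str.startswith line "date:" =
      decide (':' ∈ line.toList ∧ keyOf line.toList = "date".toList) := by
    simp only [PySem.Str.startswith, PySem.Chars.startswith, hdateL]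
    rw [Bool.eq_iff_iff]
    rw [List.isPrefixOf_iff_prefix, decide_eq_true_iff]
    exact prefix_iff _ _ hnd
  have hsw_r : PySem.Str.startswith line "remote_run_root:" =
      decide (':' ∈ line.toList ∧ keyOf line.toList = "remote_run_root".toList) := by
    simp only [PySem.Str.startswith, PySem.Chars.startswith, hrootL]
    rw [Bool.eq_iff_iff]
    rw [List.isPrefixOf_iff_prefix, decide_eq_true_iff]
    exact prefix_iff _ _ hnr
  by_cases hc : ':' ∈ line.toList
  · -- the line has a colon: B inserts (keyOf, strip restOf)
    have hfind : PySem.Str.find line ":" = ((keyOf line.toList).length : Int) := by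
      have h0 : (":".toList : List Char) = [':'] := by decide
      simp only [PySem.Str.find, h0]
      rw [find_spec, if_pos hc]
    have hsplit : pvSplitSecond line = String.ofList (restOf line.toList) := by
      unfold pvSplitSecond
      simp only [PySem.Str.splitMax?]
      have : (":".toList : List Char) = [':'] := by decide
      rw [this]
      simp only [PySem.Chars.splitMax?]
      rw [if_neg (by simp)]
      rw [split_spec, if_pos hc]
      simp
    have hkey : PySem.Str.slice line none (some ((keyOf line.toList).length : Int)) =
        String.ofList (keyOf line.toList) := by
      simp only [PySem.Str.slice]
      rw [show PySem.Chars.slice line.toList none (some ((keyOf line.toList).length : Int)) = PySem.List.slice line.toList none (some ((keyOf line.toList).length : Int)) from rfl]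
      rw [PySem.List.slice_to _ (by positivity)]
      simp [keyOf_prefix_take]
    have hval : PySem.Str.slice line (some (((keyOf line.toList).length : Int) + 1)) none =
        String.ofList (restOf line.toList) := by
      simp only [PySem.Str.slice]
      rw [show PySem.Chars.slice line.toList (some (((keyOf line.toList).length : Int) + 1)) none = PySem.List.slice line.toList (some (((keyOf line.toList).length : Int) + 1)) none from rfl]
      rw [PySem.List.slice_from _ (by positivity)]
      unfold restOf keyOf
      rw [show (((List.takeWhile (· ≠ ':') line.toList).length : Int) + 1).toNat
            = (List.takeWhile (· ≠ ':') line.toList).length + 1 from by omega]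
    have hB : pvStepB t line =
        t.insert (String.ofList (keyOf line.toList))
          (PySem.Str.strip (String.ofList (restOf line.toList))) := by
      unfold pvStepB
      rw [hfind]
      rw [if_pos (by positivity)]
      rw [hkey, hval]
    have hofk : ∀ p : String, (String.ofList (keyOf line.toList) = p) ↔ keyOf line.toList = p.toList := by
      intro p
      rw [← String.toList_inj, String.toList_ofList]
    by_cases hd : keyOf line.toList = "date".toList
    · have hne : keyOf line.toList ≠ "remote_run_root".toList := by
        rw [hd]; decide
      unfold pvStepA
      rw [hsw_d, hsw_r]
      have e1 : decide (':' ∈ line.toList ∧ keyOf line.toList = "date".toList) = true := by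
        simp [hc, hd]
      have e2 : decide (':' ∈ line.toList ∧ keyOf line.toList = "remote_run_root".toList) = false := by
        exact decide_eq_false (by rintro ⟨_, hk⟩; exact hne hk)
      rw [e1, e2]
      simp only [Bool.false_eq_true, if_true, if_false]
      rw [hB, hsplit]
      rw [show (String.ofList (keyOf line.toList)) = "date" from (hofk "date").mpr hd]
      rw [PySem.Dict.get?_insert_self, PySem.Dict.get?_insert_of_ne _ _ (by decide)]
      simp [h2]
    · by_cases hr : keyOf line.toList = "remote_run_root".toList
      · unfold pvStepA
        rw [hsw_d, hsw_r]
        have e1 : decide (':' ∈ line.toList ∧ keyOf line.toList = "date".toList) = false := by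
          exact decide_eq_false (by rintro ⟨_, hk⟩; exact hd hk)
        have e2 : decide (':' ∈ line.toList ∧ keyOf line.toList = "remote_run_root".toList) = true := by
          simp [hc, hr]
        rw [e1, e2]
        simp only [Bool.false_eq_true, if_true, if_false]
        rw [hB, hsplit]
        rw [show (String.ofList (keyOf line.toList)) = "remote_run_root" from (hofk "remote_run_root").mpr hr]
        rw [PySem.Dict.get?_insert_self, PySem.Dict.get?_insert_of_ne _ _ (by decide)]
        simp [h1]
      · unfold pvStepA
        rw [hsw_d, hsw_r]
        rw [show decide (':' ∈ line.toList ∧ keyOf line.toList = "date".toList) = false from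
              decide_eq_false (by rintro ⟨_, hk⟩; exact hd hk),
            show decide (':' ∈ line.toList ∧ keyOf line.toList = "remote_run_root".toList) = false from
              decide_eq_false (by rintro ⟨_, hk⟩; exact hr hk)]
        simp only [Bool.false_eq_true, if_false]
        rw [hB]
        rw [PySem.Dict.get?_insert_of_ne _ _ (by intro h; exact hd ((hofk "date").mp h.symm)),
            PySem.Dict.get?_insert_of_ne _ _ (by intro h; exact hr ((hofk "remote_run_root").mp h.symm))]
        simp [h1, h2]
  · -- no colon: both sides leave their state unchanged
    have hB : pvStepB t line = t := by
      unfold pvStepB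
      have : PySem.Str.find line ":" = -1 := by
        have h0 : (":".toList : List Char) = [':'] := by decide
        simp only [PySem.Str.find, h0]
        rw [find_spec, if_neg hc]
      rw [this]
      simp
    unfold pvStepA
    rw [hsw_d, hsw_r]
    rw [show decide (':' ∈ line.toList ∧ keyOf line.toList = "date".toList) = false from
          decide_eq_false (by rintro ⟨hm, _⟩; exact hc hm),
        show decide (':' ∈ line.toList ∧ keyOf line.toList = "remote_run_root".toList) = false from
          decide_eq_false (by rintro ⟨hm, _⟩; exact hc hm)]
    simp only [Bool.false_eq_true, if_false]
    rw [hB]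
    simp [h1, h2]

-- the whole loop: fold A's pair = the two lookups in fold B's table
lemma fold_eq (ls : List String) (td rr : Option String) (t : PySem.Dict String String)
    (h1 : td = t.get? "date") (h2 : rr = t.get? "remote_run_root") :
    ls.foldl pvStepA (td, rr) =
      ((ls.foldl pvStepB t).get? "date", (ls.foldl pvStepB t).get? "remote_run_root") := by
  induction ls generalizing td rr t with
  | nil => simp [h1, h2]
  | cons x xs ih =>
    rw [List.foldl_cons, List.foldl_cons, step_eq x td rr t h1 h2]
    exact ih _ _ _ rfl rfl

-- ===== VERDICT (by name: the statement is the Claim_ definition above) =====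
theorem extract_result_spec : Claim_equal_extract_result := by
  intro stdout _ _
  unfold Spec_extract_result extract_result extract_result_alt pvLookup
  rw [fold_eq (PySem.Str.splitlines stdout) none none (PySem.Dict.mk []) rfl rfl]
  cases ((PySem.Str.splitlines stdout).foldl pvStepB (PySem.Dict.mk [])).get? "date" <;>
    cases ((PySem.Str.splitlines stdout).foldl pvStepB (PySem.Dict.mk [])).get? "remote_run_root" <;>
      rfl
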